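-- pv_equiv track=rewrite | github.com/Xouper/home | stepik/n25/n25_4/z6/6.py | result
-- ===== SOURCE A (Python) =====
-- def isprime(n):
--     d = 2
--     while d * d <= n:
--         if n % d == 0:
--             return False
--         d += 1
--     return True
--
-- def result(n):
--     d = 2
--     my_del = []
--     while d * d < n:
--         if n % d == 0:
--             my_del.append(d)
--             my_del.append(n // d)
--             if len(my_del) == 2 and isprime(my_del[-1]) is False:
--                 return my_del[-1]
--         d += 1
--     return 0
-- ===== SOURCE B (Python) =====
-- def result(n):
--     if n < 2:
--         return 0
--     m = n
--     F = []
--     d = 2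
--     while d * d <= m:
--         if m % d == 0:
--             F.append(d)
--             m //= d
--         else:
--             d += 1
--     if m > 1:
--         F.append(m)
--     return n // F[0] if len(F) >= 3 else 0
-- ===== Notes on version B (the rewrite author's own statement) =====
-- stated objective: alternative
-- what changed: B fully factorizes n by trial division (repeatedly dividing out each factor) and returns n // smallest-prime-factor exactly when n has at least three prime factors counted with multiplicity, instead of A's scan for the first divisor below sqrt(n) followed by a separate primality test of the cofactor.
import Mathlib
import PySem

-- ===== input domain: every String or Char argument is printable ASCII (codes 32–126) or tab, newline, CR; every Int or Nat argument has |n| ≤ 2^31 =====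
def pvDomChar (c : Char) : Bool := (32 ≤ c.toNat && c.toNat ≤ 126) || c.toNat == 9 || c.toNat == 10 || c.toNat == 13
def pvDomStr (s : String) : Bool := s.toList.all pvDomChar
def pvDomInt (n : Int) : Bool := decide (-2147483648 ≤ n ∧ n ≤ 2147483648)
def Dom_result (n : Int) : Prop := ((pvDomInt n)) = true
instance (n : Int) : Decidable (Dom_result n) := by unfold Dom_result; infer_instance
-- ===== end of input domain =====

-- B replaces A's scan-for-first-divisor-then-primality-test by a full trial-division
-- factorization; same asymptotic cost, genuinely different algorithm ("alternative").

-- ===== PORT A =====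
-- while d * d <= n: if n % d == 0: return False; d += 1  /  return True
-- (fuel only makes the recursion total; the fuel supplied below never runs out)
def isprimeLoop : Nat → Int → Int → Bool
  | 0, _, _ => true
  | fuel + 1, n, d =>
    if d * d ≤ n then
      if PySem.Int.mod n d = 0 then false
      else isprimeLoop fuel n (d + 1)
    else true

def isprime (n : Int) : Bool := isprimeLoop (n + 1).toNat n 2

-- the while-loop of A's result, carrying my_del
def resultLoop : Nat → Int → Int → List Int → Int
  | 0, _, _, _ => 0
  | fuel + 1, n, d, myDel =>
    if d * d < n then
      if PySem.Int.mod n d = 0 then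
        let l := myDel ++ [d, PySem.Int.floordiv n d]
        if l.length = 2 ∧ isprime ((PySem.List.pyGet? l (-1)).getD 0) = false then
          (PySem.List.pyGet? l (-1)).getD 0
        else resultLoop fuel n (d + 1) l
      else resultLoop fuel n (d + 1) myDel
    else 0

def result (n : Int) : Int := resultLoop n.toNat n 2 []

-- ===== PORT B =====
-- the while-loop of Source B: divide out each factor d of m, else d += 1.
-- fuel only makes the recursion total; with the fuel supplied below it never runs out.
def floopFuel : Nat → Int → Int → List Int → Int × List Int
  | 0, m, _, F => (m, F)
  | fuel + 1, m, d, F =>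
    if d * d ≤ m then
      if PySem.Int.mod m d = 0 then
        floopFuel fuel (PySem.Int.floordiv m d) d (F ++ [d])
      else floopFuel fuel m (d + 1) F
    else (m, F)

def result_alt (n : Int) : Int :=
  if n < 2 then 0
  else
    let r := floopFuel (3 * n).toNat n 2 []
    let F := if 1 < r.1 then r.2 ++ [r.1] else r.2
    if 3 ≤ F.length then PySem.Int.floordiv n ((PySem.List.pyGet? F 0).getD 0) else 0

-- ===== PRECONDITION & SPEC =====
def Spec_result (n : Int) (out : Int) : Prop := out = result_alt n
instance (n : Int) (out : Int) : Decidable (Spec_result n out) := by unfold Spec_result; infer_instance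

-- ===== CLAIM (what is proved, stated in full; the proofs are below) =====
def Claim_equal_result : Prop := ∀ (n : Int), Dom_result n → Spec_result n (result n)

-- ===== LEMMAS AND PROOFS =====

theorem isprimeLoop_spec (fuel Q D : Nat) (hD : 2 ≤ D) (hQ : 2 ≤ Q)
    (hinv : ∀ e, 2 ≤ e → e < D → ¬ e ∣ Q) (hfuel : Q + 1 ≤ fuel + D) :
    isprimeLoop fuel (Q : Int) (D : Int) = decide (Nat.Prime Q) := by
  have hdd : ((D : Int) * D ≤ Q) ↔ D * D ≤ Q := by exact_mod_cast Iff.rfl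
  have hmz : (PySem.Int.mod (Q : Int) (D : Int) = 0) ↔ D ∣ Q := by
    rw [PySem.Int.mod_natCast]
    exact_mod_cast (Nat.dvd_iff_mod_eq_zero (m := D) (n := Q)).symm
  have hexit : ¬ D * D ≤ Q → Nat.Prime Q := by
    intro hc
    by_contra hnp
    have h1 : Q.minFac ^ 2 ≤ Q := Nat.minFac_sq_le_self (by omega) hnp
    have h2 : Q.minFac ∣ Q := Nat.minFac_dvd Q
    have h3 : 2 ≤ Q.minFac := (Nat.minFac_prime (by omega)).two_le
    have h4 : Q.minFac < D := by nlinarith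
    exact hinv _ h3 h4 h2
  match fuel with
  | 0 =>
    have hc : ¬ D * D ≤ Q := by intro h; nlinarith
    simp [isprimeLoop, hexit hc]
  | fuel + 1 =>
    rw [isprimeLoop]
    by_cases hc : D * D ≤ Q
    · rw [if_pos (hdd.mpr hc)]
      by_cases hdvd : D ∣ Q
      · rw [if_pos (hmz.mpr hdvd)]
        have hDQ : D < Q := by nlinarith
        have hnp : ¬ Nat.Prime Q := fun hp =>
          ((hp.eq_one_or_self_of_dvd D hdvd).elim (by omega) (by omega))
        simp [hnp]
      · rw [if_neg (fun h => hdvd (hmz.mp h))]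
        have hcast : ((D : Int) + 1) = ((D + 1 : Nat) : Int) := by push_cast; ring
        rw [hcast]
        exact isprimeLoop_spec fuel Q (D + 1) (by omega) hQ
          (fun e he1 he2 => by
            rcases Nat.lt_succ_iff_lt_or_eq.mp he2 with h | h
            · exact hinv e he1 h
            · subst h; exact hdvd)
          (by omega)
    · rw [if_neg (fun h => hc (hdd.mp h))]
      simp [hexit hc]

theorem resultLoop_len2 (fuel : Nat) (n d : Int) (l : List Int) (hl : 2 ≤ l.length) :
    resultLoop fuel n d l = 0 := by
  match fuel with
  | 0 => rfl
  | fuel + 1 =>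
    rw [resultLoop]
    by_cases hc : d * d < n
    · rw [if_pos hc]
      by_cases hm : PySem.Int.mod n d = 0
      · rw [if_pos hm]
        have hlen : ¬ ((l ++ [d, PySem.Int.floordiv n d]).length = 2 ∧
            isprime ((PySem.List.pyGet? (l ++ [d, PySem.Int.floordiv n d]) (-1)).getD 0) = false) := by
          simp only [List.length_append, List.length_cons, List.length_nil]
          omega
        rw [if_neg hlen]
        exact resultLoop_len2 fuel n (d + 1) _ (by simp)
      · rw [if_neg hm]
        exact resultLoop_len2 fuel n (d + 1) l hl
    · rw [if_neg hc]

theorem resultLoop_spec (fuel N D : Nat) (hD : 2 ≤ D) (hN : 2 ≤ N)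
    (hinv : ∀ e, 2 ≤ e → e < D → ¬ e ∣ N) (hfuel : N ≤ fuel + D) :
    resultLoop fuel (N : Int) (D : Int) [] =
      (if N.minFac * N.minFac < N ∧ ¬ (N / N.minFac).Prime
       then ((N / N.minFac : Nat) : Int) else 0) := by
  have hdd : ((D : Int) * D < N) ↔ D * D < N := by exact_mod_cast Iff.rfl
  have hmz : (PySem.Int.mod (N : Int) (D : Int) = 0) ↔ D ∣ N := by
    rw [PySem.Int.mod_natCast]
    exact_mod_cast (Nat.dvd_iff_mod_eq_zero (m := D) (n := N)).symm
  have hmf2 : 2 ≤ N.minFac := (Nat.minFac_prime (by omega)).two_le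
  have hmfD : D ≤ N.minFac := by
    by_contra h
    exact hinv _ hmf2 (by omega) (Nat.minFac_dvd N)
  have hexit : ¬ D * D < N →
      (if N.minFac * N.minFac < N ∧ ¬ (N / N.minFac).Prime
       then ((N / N.minFac : Nat) : Int) else 0) = 0 := by
    intro hc
    rw [if_neg]
    intro ⟨h1, _⟩
    nlinarith
  match fuel with
  | 0 =>
    have hc : ¬ D * D < N := by intro h; nlinarith
    rw [show resultLoop 0 (N : Int) (D : Int) [] = 0 from rfl, hexit hc]
  | fuel + 1 =>
    rw [resultLoop]
    by_cases hc : D * D < N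
    · rw [if_pos (hdd.mpr hc)]
      by_cases hdvd : D ∣ N
      · rw [if_pos (hmz.mpr hdvd)]
        -- here D is exactly the least prime factor
        have hDmf : D = N.minFac := le_antisymm hmfD (Nat.minFac_le_of_dvd hD hdvd)
        have hdiv : PySem.Int.floordiv (N : Int) (D : Int) = ((N / D : Nat) : Int) :=
          PySem.Int.floordiv_natCast N D
        have hq2 : 2 ≤ N / D := Nat.le_div_iff_mul_le (by omega) |>.mpr (by nlinarith)
        have hlast : (PySem.List.pyGet? ([] ++ [(D : Int), PySem.Int.floordiv (N : Int) (D : Int)]) (-1)).getD 0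
            = ((N / D : Nat) : Int) := by
          rw [hdiv]; simp [PySem.List.pyGet?, PySem.List.pyIdx?]
        have hip : isprime (((N / D : Nat) : Int)) = decide ((N / D).Prime) := by
          have h2 : (2 : Int) = ((2 : Nat) : Int) := by norm_num
          rw [isprime, h2, show (((N / D : Nat) : Int) + 1).toNat = N / D + 1 by omega]
          exact isprimeLoop_spec (N / D + 1) (N / D) 2 (by omega) hq2 (by omega) (by omega)
        by_cases hp : (N / D).Prime
        · have hcond : ¬ (([] ++ [(D : Int), PySem.Int.floordiv (N : Int) (D : Int)]).length = 2 ∧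
              isprime ((PySem.List.pyGet? ([] ++ [(D : Int), PySem.Int.floordiv (N : Int) (D : Int)]) (-1)).getD 0) = false) := by
            rw [hlast, hip]
            simp [hp]
          rw [if_neg hcond]
          rw [resultLoop_len2 fuel _ _ _ (by simp)]
          rw [if_neg]
          rw [← hDmf]
          exact fun h => h.2 hp
        · have hcond : (([] ++ [(D : Int), PySem.Int.floordiv (N : Int) (D : Int)]).length = 2 ∧
              isprime ((PySem.List.pyGet? ([] ++ [(D : Int), PySem.Int.floordiv (N : Int) (D : Int)]) (-1)).getD 0) = false) := by
            rw [hlast, hip]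
            simp [hp]
          rw [if_pos hcond, hlast]
          rw [if_pos (by rw [← hDmf]; exact ⟨hc, hp⟩)]
          rw [hDmf]
      · rw [if_neg (fun h => hdvd (hmz.mp h))]
        have hcast : ((D : Int) + 1) = ((D + 1 : Nat) : Int) := by push_cast; ring
        rw [hcast]
        exact resultLoop_spec fuel N (D + 1) (by omega) hN
          (fun e he1 he2 => by
            rcases Nat.lt_succ_iff_lt_or_eq.mp he2 with h | h
            · exact hinv e he1 h
            · subst h; exact hdvd)
          (by omega)
    · rw [if_neg (fun h => hc (hdd.mp h))]
      exact (hexit hc).symm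

theorem primeFactorsList_cons (M : Nat) (hM : 2 ≤ M) :
    M.primeFactorsList = M.minFac :: (M / M.minFac).primeFactorsList := by
  obtain ⟨k, rfl⟩ : ∃ k, M = k + 2 := ⟨M - 2, by omega⟩
  exact Nat.primeFactorsList_add_two k

theorem floopFuel_spec (fuel M D : Nat) (F : List Int) (hD : 2 ≤ D) (hM : 1 ≤ M)
    (hinv : ∀ e, 2 ≤ e → e < D → ¬ e ∣ M) (hfuel : 3 * M ≤ fuel + D) :
    (if 1 < (floopFuel fuel (M : Int) (D : Int) F).1
     then (floopFuel fuel (M : Int) (D : Int) F).2 ++ [(floopFuel fuel (M : Int) (D : Int) F).1]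
     else (floopFuel fuel (M : Int) (D : Int) F).2)
      = F ++ (M.primeFactorsList).map (fun (p : Nat) => (p : Int)) := by
  have exit_case : ¬ D * D ≤ M →
      (if 1 < ((M : Int), F).1 then ((M : Int), F).2 ++ [((M : Int), F).1] else ((M : Int), F).2)
        = F ++ (M.primeFactorsList).map (fun (p : Nat) => (p : Int)) := by
    intro hc
    rcases eq_or_lt_of_le hM with h1 | h1
    · simp [← h1, Nat.primeFactorsList_one]
    · -- M ≥ 2 with no divisor below D and D*D > M: M is prime
      have hM2 : 2 ≤ M := h1
      have hprime : M.Prime := by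
        by_contra hnp
        have h1 : M.minFac ^ 2 ≤ M := Nat.minFac_sq_le_self (by omega) hnp
        have h2 : 2 ≤ M.minFac := (Nat.minFac_prime (by omega)).two_le
        have h3 : M.minFac < D := by nlinarith
        exact hinv _ h2 h3 (Nat.minFac_dvd M)
      rw [Nat.primeFactorsList_prime hprime]
      have : (1 : Int) < (M : Int) := by exact_mod_cast hM2
      simp [this]
  match fuel with
  | 0 =>
    have hc : ¬ D * D ≤ M := by intro h; nlinarith
    simpa [floopFuel] using exit_case hc
  | fuel + 1 =>
    rw [floopFuel]
    have hdd : ((D : Int) * D ≤ M) ↔ D * D ≤ M := by exact_mod_cast Iff.rfl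
    have hmz : (PySem.Int.mod (M : Int) (D : Int) = 0) ↔ D ∣ M := by
      rw [PySem.Int.mod_natCast]
      exact_mod_cast (Nat.dvd_iff_mod_eq_zero (m := D) (n := M)).symm
    by_cases hc : D * D ≤ M
    · rw [if_pos (hdd.mpr hc)]
      by_cases hdvd : D ∣ M
      · rw [if_pos (hmz.mpr hdvd)]
        have hM2 : 2 ≤ M := by nlinarith
        have hmf2 : 2 ≤ M.minFac := (Nat.minFac_prime (by omega)).two_le
        have hDmf : D = M.minFac := by
          refine le_antisymm ?_ (Nat.minFac_le_of_dvd hD hdvd)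
          by_contra h
          exact hinv _ hmf2 (by omega) (Nat.minFac_dvd M)
        have hdiv : PySem.Int.floordiv (M : Int) (D : Int) = ((M / D : Nat) : Int) :=
          PySem.Int.floordiv_natCast M D
        have hlt : M / D < M := Nat.div_lt_self (by omega) (by omega)
        have hge : D ≤ M / D := Nat.le_div_iff_mul_le (by omega) |>.mpr hc
        rw [hdiv, floopFuel_spec fuel (M / D) D (F ++ [(D : Int)]) hD (by omega)
          (fun e he1 he2 hdvd' => hinv e he1 he2 (hdvd'.trans (Nat.div_dvd_of_dvd hdvd)))
          (by omega)]
        rw [primeFactorsList_cons M hM2, ← hDmf]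
        simp
      · rw [if_neg (fun h => hdvd (hmz.mp h))]
        have hcast : ((D : Int) + 1) = ((D + 1 : Nat) : Int) := by push_cast; ring
        rw [hcast, floopFuel_spec fuel M (D + 1) F (by omega) hM
          (fun e he1 he2 => by
            rcases Nat.lt_succ_iff_lt_or_eq.mp he2 with h | h
            · exact hinv e he1 h
            · subst h; exact hdvd)
          (by omega)]
    · rw [if_neg (fun h => hc (hdd.mp h))]
      exact exit_case hc

theorem two_le_factors_length (q : Nat) :
    2 ≤ q.primeFactorsList.length ↔ 2 ≤ q ∧ ¬ q.Prime := by
  constructor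
  · intro h
    have hq2 : 2 ≤ q := by
      by_contra h'
      interval_cases q <;> simp [Nat.primeFactorsList_zero, Nat.primeFactorsList_one] at h
    refine ⟨hq2, fun hp => ?_⟩
    rw [Nat.primeFactorsList_prime hp] at h
    simp at h
  · rintro ⟨hq2, hnp⟩
    rw [primeFactorsList_cons q hq2]
    have h1 : q.minFac ^ 2 ≤ q := Nat.minFac_sq_le_self (by omega) hnp
    have h2 : 2 ≤ q.minFac := (Nat.minFac_prime (by omega)).two_le
    have h3 : 2 ≤ q / q.minFac := Nat.le_div_iff_mul_le (by omega) |>.mpr (by nlinarith)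
    have hne : (q / q.minFac).primeFactorsList ≠ [] :=
      (Nat.primeFactorsList_ne_nil _).mpr (by omega)
    have := List.length_pos_of_ne_nil hne
    simp only [List.length_cons]
    omega

theorem bridge (N : Nat) (hN : 2 ≤ N) :
    (N.minFac * N.minFac < N ∧ ¬ (N / N.minFac).Prime) ↔
      3 ≤ N.primeFactorsList.length := by
  have hmf2 : 2 ≤ N.minFac := (Nat.minFac_prime (by omega)).two_le
  have hdvd : N.minFac ∣ N := Nat.minFac_dvd N
  have hNpq : N.minFac * (N / N.minFac) = N := Nat.mul_div_cancel' hdvd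
  rw [primeFactorsList_cons N hN]
  simp only [List.length_cons]
  have hiff := two_le_factors_length (N / N.minFac)
  constructor
  · rintro ⟨hlt, hnp⟩
    have hq2 : 2 ≤ N / N.minFac := Nat.le_div_iff_mul_le (by omega) |>.mpr (by nlinarith)
    have := hiff.mpr ⟨hq2, hnp⟩
    omega
  · intro h
    have h2 : 2 ≤ (N / N.minFac).primeFactorsList.length := by omega
    obtain ⟨hq2, hnp⟩ := hiff.mp h2
    refine ⟨?_, hnp⟩
    -- q has at least two prime factors, each at least minFac N, so q ≥ minFac N ^ 2
    obtain ⟨a, rest1, hcons⟩ := List.exists_cons_of_ne_nil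
      ((Nat.primeFactorsList_ne_nil _).mpr (by omega) :
        (N / N.minFac).primeFactorsList ≠ [])
    obtain ⟨b, rest, hcons2⟩ : ∃ b rest, rest1 = b :: rest := by
      cases rest1 with
      | nil => rw [hcons] at h2; simp at h2
      | cons b rest => exact ⟨b, rest, rfl⟩
    rw [hcons2] at hcons
    have hmem : ∀ e ∈ (N / N.minFac).primeFactorsList, N.minFac ≤ e := fun e he =>
      Nat.minFac_le_of_dvd (Nat.prime_of_mem_primeFactorsList he).two_le
        ((Nat.dvd_of_mem_primeFactorsList he).trans (Nat.div_dvd_of_dvd hdvd))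
    have ha : N.minFac ≤ a := hmem a (by rw [hcons]; simp)
    have hb : N.minFac ≤ b := hmem b (by rw [hcons]; simp)
    have hrest : 0 < rest.prod := List.prod_pos (fun x hx =>
      Nat.pos_of_mem_primeFactorsList (by rw [hcons]; simp [hx]))
    have hprod : (N / N.minFac).primeFactorsList.prod = N / N.minFac :=
      Nat.prod_primeFactorsList (by omega)
    rw [hcons] at hprod
    simp only [List.prod_cons] at hprod
    have h5 : N.minFac * N.minFac ≤ a * b := Nat.mul_le_mul ha hb
    have h6 : b ≤ b * rest.prod := Nat.le_mul_of_pos_right b hrest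
    have h7 : a * b ≤ a * (b * rest.prod) := Nat.mul_le_mul_left a h6
    have hq_ge : N.minFac * N.minFac ≤ N / N.minFac := by omega
    have h8 : N.minFac * (N.minFac * N.minFac) ≤ N.minFac * (N / N.minFac) :=
      Nat.mul_le_mul_left _ hq_ge
    nlinarith

theorem result_spec' : ∀ n : Int, result n = result_alt n := by
  intro n
  by_cases hn2 : n < 2
  · rw [result, result_alt, if_pos hn2]
    cases hk : n.toNat with
    | zero => rfl
    | succ k =>
      rw [resultLoop, if_neg (by nlinarith : ¬ (2 : Int) * 2 < n)]
  · obtain ⟨N, rfl⟩ : ∃ N : Nat, n = (N : Int) := ⟨n.toNat, by omega⟩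
    have hN : 2 ≤ N := by omega
    have h2c : ((2 : Nat) : Int) = (2 : Int) := by norm_num
    -- A's side
    have hA : result (N : Int) =
        (if N.minFac * N.minFac < N ∧ ¬ (N / N.minFac).Prime
         then ((N / N.minFac : Nat) : Int) else 0) := by
      rw [result, Int.toNat_natCast, ← h2c]
      exact resultLoop_spec N N 2 le_rfl hN (by omega) (by omega)
    -- B's side
    have hB := floopFuel_spec (3 * N) N 2 [] le_rfl (by omega) (by omega) (by omega)
    rw [h2c] at hB
    have hfuel : (3 * (N : Int)).toNat = 3 * N := by
      rw [show (3 : Int) * N = ((3 * N : Nat) : Int) by push_cast; ring, Int.toNat_natCast]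
    rw [hA, result_alt, if_neg (by omega : ¬ ((N : Int) < 2)), hfuel]
    simp only [List.nil_append] at hB
    dsimp only
    rw [hB]
    rw [primeFactorsList_cons N hN]
    simp only [List.map_cons, List.length_cons, List.length_map]
    have hget : (PySem.List.pyGet?
        ((N.minFac : Int) :: ((N / N.minFac).primeFactorsList.map (fun (p : Nat) => (p : Int)))) 0).getD 0
        = (N.minFac : Int) := by
      simp [PySem.List.pyGet?, PySem.List.pyIdx?]
    rw [hget]
    have hlen : N.primeFactorsList.length = (N / N.minFac).primeFactorsList.length + 1 := by
      rw [primeFactorsList_cons N hN]; simp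
    by_cases hcond : N.minFac * N.minFac < N ∧ ¬ (N / N.minFac).Prime
    · rw [if_pos hcond, if_pos (by have := (bridge N hN).mp hcond; omega)]
      rw [PySem.Int.floordiv_natCast]
    · rw [if_neg hcond, if_neg (fun h => hcond ((bridge N hN).mpr (by omega)))]

-- ===== VERDICT (by name: the statement is the Claim_ definition above) =====
theorem result_spec : Claim_equal_result := by
  intro n _
  unfold Spec_result
  exact result_spec' n
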